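-- pv_equiv track=rewrite | github.com/arkadev49/MyPythonProjects | Rock-Paper-Scissors/game.py | Stronger
-- ===== SOURCE A (Python) =====
-- def Stronger(options, key):
--     size = len(options) // 2
--     i = 0
--     res = []
--     found = False
--     while size:
--         if options[i] == key:
--             found = True
--         if found:
--             i += 1
--             if i == len(options):
--                 i = 0
--             res.append(options[i])
--             size -= 1
--         else:
--             i += 1
--
--     return res
-- ===== SOURCE B (Python) =====
-- def Stronger(options, key):
--     size = len(options) // 2
--     if size == 0:
--         return []
--     i = options.index(key)
--     rotated = options[i + 1:] + options[:i + 1]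
--     return rotated[:size]
-- ===== Notes on version B (the rewrite author's own statement) =====
-- stated objective: simpler
-- what changed: A's fused found-flag loop with manual index wraparound is replaced by a loop-free rotate-and-slice: find the key's first index with list.index, rotate the list by slicing and concatenation, and take the first half with a slice.
import Mathlib
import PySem

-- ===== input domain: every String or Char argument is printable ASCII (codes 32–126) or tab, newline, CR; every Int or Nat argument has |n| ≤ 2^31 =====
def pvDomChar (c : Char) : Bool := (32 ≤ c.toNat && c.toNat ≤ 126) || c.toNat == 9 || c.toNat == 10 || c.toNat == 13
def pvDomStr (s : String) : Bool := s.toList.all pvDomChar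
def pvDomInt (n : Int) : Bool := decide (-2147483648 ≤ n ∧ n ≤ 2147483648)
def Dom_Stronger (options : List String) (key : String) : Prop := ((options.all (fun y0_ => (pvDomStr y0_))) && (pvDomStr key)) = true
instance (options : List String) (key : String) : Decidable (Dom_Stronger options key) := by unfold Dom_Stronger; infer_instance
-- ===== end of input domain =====

-- B replaces A's fused found-flag loop (manual index wraparound) by a loop-free
-- rotate-and-slice: list.index, slice-and-concatenate rotation, slice of the first half
-- (objective: simpler).

-- ===== PORT A =====
-- A's while loop with state (size, i, found, res); 'options[i]' at the loop head raises
-- IndexError when i is out of range (the port stops with res there; such inputs are outside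
-- Pre_). The index read after the explicit wraparound is always in range (getD is exact there).
def strongerLoop (options : List String) (key : String) : Nat → Nat → Bool → List String → List String
  | 0, _, _, res => res
  | size+1, i, found, res =>
    if h : i < options.length then
      if found || (options.getD i "" == key) then
        strongerLoop options key size (if i + 1 = options.length then 0 else i + 1) true
          (res ++ [options.getD (if i + 1 = options.length then 0 else i + 1) ""])
      else
        strongerLoop options key (size+1) (i+1) found res
    else res  -- Python raises IndexError here
  termination_by size i => (size, options.length - i)
  decreasing_by
  · exact Prod.Lex.left _ _ (Nat.lt_succ_self _)
  · exact Prod.Lex.right _ (by omega)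

def Stronger (options : List String) (key : String) : List String :=
  strongerLoop options key (options.length / 2) 0 false []

-- ===== PORT B =====
-- B: size = len//2; guard size == 0; i = options.index(key) (Python raises ValueError when
-- absent — none here, outside Pre_); rotated = options[i+1:] + options[:i+1]; rotated[:size].
def Stronger_alt (options : List String) (key : String) : List String :=
  let size := options.length / 2
  if size = 0 then []
  else
    match PySem.List.index? options key with
    | none => []  -- Python raises ValueError here; outside Pre_
    | some i =>
      let rotated := PySem.List.slice options (some ((i : Int) + 1)) none
                      ++ PySem.List.slice options none (some ((i : Int) + 1))
      PySem.List.slice rotated none (some (size : Int))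

-- ===== PRECONDITION & SPEC =====
-- Pre_ excludes exactly the inputs on which A raises IndexError: key absent while
-- len(options) >= 2 (B raises ValueError on exactly the same inputs).
def Pre_Stronger (options : List String) (key : String) : Prop :=
  options.length < 2 ∨ key ∈ options
instance (options : List String) (key : String) : Decidable (Pre_Stronger options key) := by
  unfold Pre_Stronger; infer_instance

def pvWitness_Stronger : List String × String := (["rock", "paper", "scissors"], "rock")

def Spec_Stronger (options : List String) (key : String) (out : List String) : Prop := out = Stronger_alt options key
instance (options : List String) (key : String) (out : List String) : Decidable (Spec_Stronger options key out) := by unfold Spec_Stronger; infer_instance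

-- ===== CLAIM (what is proved, stated in full; the proofs are below) =====
def Claim_equal_Stronger : Prop := ∀ (options : List String) (key : String), Dom_Stronger options key → Pre_Stronger options key → Spec_Stronger options key (Stronger options key)

-- ===== LEMMAS AND PROOFS =====

-- Peel the first element off a cyclic window of modular indices.
theorem window_succ (options : List String) (i m : Nat) (_hn : 0 < options.length) :
    (List.range (m+1)).map (fun j => options.getD ((i + 1 + j) % options.length) "")
      = options.getD ((i + 1) % options.length) ""
        :: (List.range m).map
             (fun j => options.getD (((i + 1) % options.length + 1 + j) % options.length) "") := by
  rw [List.range_succ_eq_map, List.map_cons, List.map_map]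
  refine congrArg₂ List.cons (by norm_num) ?_
  apply List.map_congr_left
  intro j _
  simp only [Function.comp]
  have hsh : ((i + 1) % options.length + 1 + j) % options.length
      = (i + 1 + (j + 1)) % options.length := by
    rw [Nat.add_assoc, Nat.mod_add_mod]; congr 1; omega
  rw [hsh]

-- Once found, A collects the next `size` elements cyclically: closed form with modular indices.
theorem strongerLoop_true (options : List String) (key : String) :
    ∀ (size i : Nat) (res : List String), i < options.length →
    strongerLoop options key size i true res
      = res ++ (List.range size).map (fun j => options.getD ((i + 1 + j) % options.length) "") := by
  intro size
  induction size with
  | zero => intro i res _; simp [strongerLoop]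
  | succ m ih =>
    intro i res hi
    rw [strongerLoop, dif_pos hi]
    simp only [Bool.true_or, if_true]
    have hi'mod : (if i + 1 = options.length then 0 else i + 1) = (i + 1) % options.length := by
      by_cases hc : i + 1 = options.length
      · rw [if_pos hc, hc, Nat.mod_self]
      · rw [if_neg hc, Nat.mod_eq_of_lt (by omega)]
    have hi'lt : (if i + 1 = options.length then 0 else i + 1) < options.length := by
      rw [hi'mod]; exact Nat.mod_lt _ (by omega)
    rw [ih _ _ hi'lt, List.append_assoc, hi'mod, List.singleton_append,
      ← window_succ options i m (by omega)]

-- A's search phase walks up to the FIRST occurrence k of key, then strongerLoop_true takes over.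
theorem strongerLoop_false_first (options : List String) (key : String) (k : Nat)
    (hk : k < options.length) (hkey : options[k] = key)
    (hfirst : ∀ j (hj : j < k), options[j] ≠ key) :
    ∀ (d i : Nat), options.length - i = d → i ≤ k →
    ∀ (size : Nat) (res : List String),
    strongerLoop options key (size+1) i false res
      = res ++ (List.range (size+1)).map (fun j => options.getD ((k + 1 + j) % options.length) "") := by
  intro d
  induction d with
  | zero => intro i hd hik; omega
  | succ m ih =>
    intro i hd hik size res
    have hi : i < options.length := by omega
    rw [strongerLoop, dif_pos hi]
    by_cases heq : i = k
    · subst heq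
      have hbeq : (options.getD i "" == key) = true := by
        rw [List.getD_eq_getElem _ _ hi, hkey]; exact beq_self_eq_true _
      simp only [Bool.false_or, hbeq, if_true]
      have hi'mod : (if i + 1 = options.length then 0 else i + 1) = (i + 1) % options.length := by
        by_cases hc : i + 1 = options.length
        · rw [if_pos hc, hc, Nat.mod_self]
        · rw [if_neg hc, Nat.mod_eq_of_lt (by omega)]
      have hi'lt : (if i + 1 = options.length then 0 else i + 1) < options.length := by
        rw [hi'mod]; exact Nat.mod_lt _ (by omega)
      rw [strongerLoop_true options key size _ _ hi'lt, List.append_assoc, hi'mod,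
        List.singleton_append, ← window_succ options i size (by omega)]
    · have hne : options[i] ≠ key := hfirst i (by omega)
      have hbeq : (options.getD i "" == key) = false := by
        rw [List.getD_eq_getElem _ _ hi]; exact beq_eq_false_iff_ne.mpr hne
      simp only [Bool.false_or, hbeq]
      exact ih (i+1) (by omega) (by omega) size res

-- The rotation by slicing equals the modular-index window of length size (size ≤ length).
theorem rotation_take_eq_window (options : List String) (i size : Nat)
    (hi : i < options.length) (hs : size ≤ options.length) :
    (options.drop (i+1) ++ options.take (i+1)).take size
      = (List.range size).map (fun j => options.getD ((i + 1 + j) % options.length) "") := by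
  set n := options.length with hn
  have hrotlen : (options.drop (i+1) ++ options.take (i+1)).length = n := by
    simp; omega
  apply List.ext_getElem
  · simp [hrotlen]; omega
  · intro j hj1 hj2
    have hjsz : j < size := by simpa using hj2
    have hjn : j < n := by omega
    rw [List.getElem_take, List.getElem_map, List.getElem_range]
    have hmod : (i + 1 + j) % n < n := Nat.mod_lt _ (by omega)
    rw [List.getD_eq_getElem _ _ (by omega)]
    rw [List.getElem_append]
    split
    · next hcase =>
      have hlt : i + 1 + j < n := by simp at hcase; omega
      rw [List.getElem_drop]
      congr 1
      rw [Nat.mod_eq_of_lt hlt]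
    · next hcase =>
      simp only [List.length_drop] at hcase
      have hge : n ≤ i + 1 + j := by omega
      have hlt2 : i + 1 + j < 2 * n := by omega
      have : (i + 1 + j) % n = i + 1 + j - n := by
        rw [Nat.mod_eq_sub_mod hge, Nat.mod_eq_of_lt (by omega)]
      rw [List.getElem_take]
      congr 1
      rw [this]
      simp only [List.length_drop]
      omega

-- ===== VERDICT (by name: the statement is the Claim_ definition above) =====
theorem Stronger_spec : Claim_equal_Stronger := by
  intro options key _ hpre
  unfold Spec_Stronger Stronger Stronger_alt
  by_cases hsz : options.length / 2 = 0
  · simp [strongerLoop, hsz]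
  · have hmem : key ∈ options := by
      cases hpre with
      | inl h => omega
      | inr h => exact h
    obtain ⟨k, hk⟩ := Option.isSome_iff_exists.mp
      ((PySem.List.index?_isSome_iff options key).mpr hmem)
    obtain ⟨hklt, hkey, hfirst⟩ := PySem.List.getElem_of_index?_eq_some hk
    simp only [if_neg hsz, hk]
    have hcast : ((k : Int) + 1) = ((k + 1 : Nat) : Int) := by push_cast; ring
    rw [hcast, PySem.List.slice_from_natCast, PySem.List.slice_to_natCast]
    rw [PySem.List.slice_to_natCast]
    obtain ⟨m, hm⟩ : ∃ m, options.length / 2 = m + 1 := ⟨options.length / 2 - 1, by omega⟩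
    rw [rotation_take_eq_window options k _ hklt (by omega), hm]
    rw [strongerLoop_false_first options key k hklt hkey hfirst options.length 0 (by omega)
      (by omega) m []]
    simp
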